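-- pv_equiv track=rewrite | github.com/Swadesh13/redhen-gesture | src/code/pose/keypoints.py | divide_keypoints_fn
-- ===== SOURCE A (Python) =====
-- from typing import Dict, List, Tuple
--
-- def divide_keypoints_fn(keypoints: Dict, WINDOW_SIZE: int) -> Dict:
--     """
--     Divide on the basis of missing frames (due to multiple persons with no gesture annotations)
--     """
--     keys = list(sorted(keypoints.keys()))
--     gestures_dict = {}
--     gesture_fn = []
--     frame_count = 0
--     gesture_count = 1
--     for i, key in enumerate(keys):
--         gesture_fn.append(keypoints[key])
--         frame_count += 1
--         if i < len(keys)-1: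
--             if keypoints[key]["frame_no"] != keypoints[keys[i+1]]["frame_no"] - 1:
--                 if frame_count >= WINDOW_SIZE:
--                     gestures_dict[str(gesture_count)] = gesture_fn
--                     gesture_count += 1
--                     frame_count = 0
--                     gesture_fn = []
--         else:   # for the last value
--             if frame_count >= WINDOW_SIZE:
--                 gestures_dict[str(gesture_count)] = gesture_fn
--                 gesture_count += 1
--                 frame_count = 0
--                 gesture_fn = []
--     return gestures_dict
-- ===== SOURCE B (Python) =====
-- def divide_keypoints_fn(keypoints, WINDOW_SIZE):
--     """Two-pass rewrite: split the sorted values into maximal consecutive-frame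
--     runs, then sweep the runs once, flushing the buffer at each run end when it
--     has reached WINDOW_SIZE (short runs stay buffered and merge into the next)."""
--     vals = [keypoints[k] for k in sorted(keypoints)]
--     runs = []
--     cur = []
--     for v in vals:
--         if cur and cur[-1]["frame_no"] != v["frame_no"] - 1:
--             runs.append(cur)
--             cur = []
--         cur.append(v)
--     if cur:
--         runs.append(cur)
--     gestures = {}
--     buf = []
--     count = 1
--     for run in runs:
--         buf = buf + run
--         if len(buf) >= WINDOW_SIZE:
--             gestures[str(count)] = buf
--             count += 1
--             buf = []
--     return gestures
-- ===== Notes on version B (the rewrite author's own statement) =====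
-- stated objective: alternative
-- what changed: Replaces A's single stateful loop with an index lookahead and duplicated flush branches by a two-pass decomposition: first split the sorted values into maximal consecutive-frame runs, then fold over the runs with a buffer that is flushed once per run end when it reaches WINDOW_SIZE.
import Mathlib
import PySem

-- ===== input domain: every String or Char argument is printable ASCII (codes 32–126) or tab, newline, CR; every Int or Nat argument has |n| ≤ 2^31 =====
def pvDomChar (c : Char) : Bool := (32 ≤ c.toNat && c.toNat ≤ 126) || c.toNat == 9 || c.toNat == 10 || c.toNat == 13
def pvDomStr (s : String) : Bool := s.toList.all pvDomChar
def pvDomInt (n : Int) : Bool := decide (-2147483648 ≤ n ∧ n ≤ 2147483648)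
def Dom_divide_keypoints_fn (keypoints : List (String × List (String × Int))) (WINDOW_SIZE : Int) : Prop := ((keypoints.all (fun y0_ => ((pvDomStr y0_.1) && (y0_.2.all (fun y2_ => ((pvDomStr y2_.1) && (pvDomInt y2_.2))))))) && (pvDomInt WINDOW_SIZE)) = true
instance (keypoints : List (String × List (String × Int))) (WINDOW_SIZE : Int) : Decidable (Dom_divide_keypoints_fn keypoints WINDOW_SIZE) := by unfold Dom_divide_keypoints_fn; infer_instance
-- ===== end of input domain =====

-- B re-implements A as two passes (run segmentation, then a buffered fold over the runs); same cost, plainer structure.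

-- ===== PORT A =====
-- shared helpers for both ports: keypoints[k] (first-match dict lookup; always in range
-- because k is drawn from the key set) and v["frame_no"] (the default 0 branch is only
-- reached outside Pre_, where the Python raises KeyError)
def pvVal (keypoints : List (String × List (String × Int))) (k : String) : List (String × Int) :=
  ((keypoints.find? (fun p => p.1 == k)).map (·.2)).getD []

def pvFrame (v : List (String × Int)) : Int :=
  ((v.find? (fun q => q.1 == "frame_no")).map (·.2)).getD 0

-- the for-loop of A: index i mirrors enumerate, state = (gestures_dict, gesture_fn, frame_count, gesture_count)
def pvStepA (kp : List (String × List (String × Int))) (W : Int) (keys : List String) (n : Nat)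
    (i : Nat) (key : String)
    (st : PySem.Dict String (List (List (String × Int))) × List (List (String × Int)) × Int × Int) :
    PySem.Dict String (List (List (String × Int))) × List (List (String × Int)) × Int × Int :=
  match st with
  | (gd, gfn0, fc0, gc) =>
    let gfn := gfn0 ++ [pvVal kp key]
    let fc := fc0 + 1
    if i < n - 1 then
      if pvFrame (pvVal kp key) ≠ pvFrame (pvVal kp (keys.getD (i+1) "")) - 1 then
        if W ≤ fc then (gd.insert (PySem.Int.toStr gc) gfn, ([], (0:Int), gc + 1))
        else (gd, gfn, fc, gc)
      else (gd, gfn, fc, gc)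
    else
      if W ≤ fc then (gd.insert (PySem.Int.toStr gc) gfn, ([], (0:Int), gc + 1))
      else (gd, gfn, fc, gc)

def pvLoopA (kp : List (String × List (String × Int))) (W : Int) (keys : List String) (n : Nat) :
    List String → Nat →
    PySem.Dict String (List (List (String × Int))) × List (List (String × Int)) × Int × Int →
    PySem.Dict String (List (List (String × Int))) × List (List (String × Int)) × Int × Int
  | [], _, st => st
  | key :: rest, i, st => pvLoopA kp W keys n rest (i+1) (pvStepA kp W keys n i key st)

def divide_keypoints_fn (keypoints : List (String × List (String × Int))) (WINDOW_SIZE : Int) :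
    List (String × List (List (String × Int))) :=
  let keys := PySem.List.sorted (PySem.Set.ofList (keypoints.map Prod.fst)) (fun x => x) false
  (pvLoopA keypoints WINDOW_SIZE keys keys.length keys 0 (PySem.Dict.empty, [], 0, 1)).1.items

-- ===== PORT B =====
-- pass 1 step: extend the current run, or close it when the frame numbers are not consecutive
def pvStep1 (st : List (List (List (String × Int))) × List (List (String × Int)))
    (v : List (String × Int)) :
    List (List (List (String × Int))) × List (List (String × Int)) :=
  match st.2.getLast? with
  | some last =>
    if pvFrame last ≠ pvFrame v - 1 then (st.1 ++ [st.2], [v]) else (st.1, st.2 ++ [v])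
  | none => (st.1, st.2 ++ [v])

-- the trailing `if cur: runs.append(cur)`
def pvFin (st : List (List (List (String × Int))) × List (List (String × Int))) :
    List (List (List (String × Int))) :=
  if st.2 ≠ [] then st.1 ++ [st.2] else st.1

-- pass 2 step: append the run to the buffer; flush when it has reached WINDOW_SIZE
def pvStep2 (W : Int)
    (st : PySem.Dict String (List (List (String × Int))) × List (List (String × Int)) × Int)
    (run : List (List (String × Int))) :
    PySem.Dict String (List (List (String × Int))) × List (List (String × Int)) × Int :=
  match st with
  | (gd, buf0, count) =>
    let buf := buf0 ++ run
    if W ≤ (buf.length : Int) then (gd.insert (PySem.Int.toStr count) buf, ([], count + 1))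
    else (gd, buf, count)

def divide_keypoints_fn_alt (keypoints : List (String × List (String × Int))) (WINDOW_SIZE : Int) :
    List (String × List (List (String × Int))) :=
  let vals := (PySem.List.sorted (PySem.Set.ofList (keypoints.map Prod.fst)) (fun x => x) false).map
    (pvVal keypoints)
  let runs := pvFin (vals.foldl pvStep1 ([], []))
  (runs.foldl (pvStep2 WINDOW_SIZE) (PySem.Dict.empty, [], 1)).1.items

-- ===== PRECONDITION & SPEC =====
-- Pre_ excludes exactly the inputs where the Python A raises KeyError: two or more distinct
-- keys while some looked-up value dict lacks the key "frame_no" (B raises there too).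
def Pre_divide_keypoints_fn (keypoints : List (String × List (String × Int))) (WINDOW_SIZE : Int) : Prop :=
  (PySem.Set.ofList (keypoints.map Prod.fst)).length ≤ 1 ∨
    ∀ k ∈ PySem.Set.ofList (keypoints.map Prod.fst),
      ((keypoints.find? (fun p => p.1 == k)).map
        (fun p => p.2.any (fun q => q.1 == "frame_no"))).getD false = true

instance (keypoints : List (String × List (String × Int))) (WINDOW_SIZE : Int) :
    Decidable (Pre_divide_keypoints_fn keypoints WINDOW_SIZE) := by
  unfold Pre_divide_keypoints_fn; infer_instance

def pvWitness_divide_keypoints_fn : (List (String × List (String × Int))) × Int :=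
  ([("a", [("frame_no", 1)]), ("b", [("frame_no", 2)])], 1)

def Spec_divide_keypoints_fn (keypoints : List (String × List (String × Int))) (WINDOW_SIZE : Int)
    (out : List (String × List (List (String × Int)))) : Prop :=
  out = divide_keypoints_fn_alt keypoints WINDOW_SIZE

instance (keypoints : List (String × List (String × Int))) (WINDOW_SIZE : Int)
    (out : List (String × List (List (String × Int)))) :
    Decidable (Spec_divide_keypoints_fn keypoints WINDOW_SIZE out) := by
  unfold Spec_divide_keypoints_fn; infer_instance

-- ===== CLAIM (what is proved, stated in full; the proofs are below) =====
def Claim_equal_divide_keypoints_fn : Prop := ∀ (keypoints : List (String × List (String × Int))) (WINDOW_SIZE : Int), Dom_divide_keypoints_fn keypoints WINDOW_SIZE → Pre_divide_keypoints_fn keypoints WINDOW_SIZE → Spec_divide_keypoints_fn keypoints WINDOW_SIZE (divide_keypoints_fn keypoints WINDOW_SIZE)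

-- ===== LEMMAS AND PROOFS =====

-- the runs of a value list, computed by lookahead (proof-only intermediate)
def pvRunsOf : List (List (String × Int)) → List (List (List (String × Int)))
  | [] => []
  | [v] => [[v]]
  | v :: w :: rest =>
    if pvFrame v ≠ pvFrame w - 1 then [v] :: pvRunsOf (w :: rest)
    else match pvRunsOf (w :: rest) with
      | r :: rs => (v :: r) :: rs
      | [] => [[v]]

-- A's loop re-expressed over the value list (proof-only intermediate)
def pvLoopV (W : Int) :
    List (List (String × Int)) →
    PySem.Dict String (List (List (String × Int))) × List (List (String × Int)) × Int × Int →
    PySem.Dict String (List (List (String × Int)))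
  | [], st => st.1
  | [v], st =>
    match st with
    | (gd, gfn0, fc0, gc) =>
      if W ≤ fc0 + 1 then gd.insert (PySem.Int.toStr gc) (gfn0 ++ [v]) else gd
  | v :: w :: rest, st =>
    match st with
    | (gd, gfn0, fc0, gc) =>
      let gfn := gfn0 ++ [v]
      let fc := fc0 + 1
      let st' :=
        if pvFrame v ≠ pvFrame w - 1 then
          if W ≤ fc then (gd.insert (PySem.Int.toStr gc) gfn, ([], (0:Int), gc + 1))
          else (gd, gfn, fc, gc)
        else (gd, gfn, fc, gc)
      pvLoopV W (w :: rest) st'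

lemma pvRunsOf_cons_ne_nil (v : List (String × Int)) (vs : List (List (String × Int))) :
    ∃ r rs, pvRunsOf (v :: vs) = r :: rs := by
  cases vs with
  | nil => exact ⟨[v], [], rfl⟩
  | cons w vs' =>
    unfold pvRunsOf
    split_ifs with h
    · exact ⟨[v], pvRunsOf (w :: vs'), rfl⟩
    · cases h2 : pvRunsOf (w :: vs') with
      | nil => exact ⟨[v], [], rfl⟩
      | cons r rs => exact ⟨v :: r, rs, rfl⟩

-- L0: A's indexed loop equals the lookahead loop over the values of the suffix
lemma loopA_eq_loopV (kp : List (String × List (String × Int))) (W : Int) (keys : List String) :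
    ∀ (suffix : List String) (i : Nat) st, keys.drop i = suffix →
      (pvLoopA kp W keys keys.length suffix i st).1 = pvLoopV W (suffix.map (pvVal kp)) st := by
  intro suffix
  induction suffix with
  | nil => intro i st _; rfl
  | cons key rest ih =>
    intro i st hdrop
    have hlen : keys.length - i = (key :: rest).length := by
      rw [← List.length_drop, hdrop]
    simp only [List.length_cons] at hlen
    have hi : i < keys.length := by omega
    have hdrop' : keys.drop (i+1) = rest := by
      have h1 : keys.drop (i+1) = (keys.drop i).drop 1 := by rw [List.drop_drop]
      rw [h1, hdrop]; rfl
    rw [show pvLoopA kp W keys keys.length (key :: rest) i st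
          = pvLoopA kp W keys keys.length rest (i+1) (pvStepA kp W keys keys.length i key st)
        from rfl]
    rw [ih (i+1) _ hdrop']
    obtain ⟨gd, gfn0, fc0, gc⟩ := st
    cases rest with
    | nil =>
      simp only [List.length_nil] at hlen
      have hcond : ¬ i < keys.length - 1 := by omega
      simp only [List.map_nil, List.map_cons, pvLoopV, pvStepA, hcond, if_false]
      split_ifs <;> rfl
    | cons key2 rest' =>
      simp only [List.length_cons] at hlen
      have hcond : i < keys.length - 1 := by omega
      have hsome : keys[i+1]? = some key2 := by
        have h := congrArg (fun l => l[0]?) hdrop'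
        simpa [List.getElem?_drop] using h
      have hget : keys.getD (i+1) "" = key2 := by
        simp [List.getD_eq_getElem?_getD, hsome]
      simp only [List.map_cons]
      rw [show pvLoopV W (pvVal kp key :: pvVal kp key2 :: rest'.map (pvVal kp)) (gd, gfn0, fc0, gc)
            = pvLoopV W (pvVal kp key2 :: rest'.map (pvVal kp))
                (if pvFrame (pvVal kp key) ≠ pvFrame (pvVal kp key2) - 1 then
                   if W ≤ fc0 + 1 then
                     (gd.insert (PySem.Int.toStr gc) (gfn0 ++ [pvVal kp key]), ([], (0:Int), gc + 1))
                   else (gd, gfn0 ++ [pvVal kp key], fc0 + 1, gc)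
                 else (gd, gfn0 ++ [pvVal kp key], fc0 + 1, gc))
          from rfl]
      congr 1
      simp only [pvStepA, hcond, if_true, hget]

-- L1: pass 1 with a non-empty current run computes the lookahead runs
lemma pass1_spec :
    ∀ (vals : List (List (String × Int))) cur0 l runs,
      pvFin (vals.foldl pvStep1 (runs, cur0 ++ [l])) =
        runs ++ (match pvRunsOf (l :: vals) with
                 | r :: rs => (cur0 ++ r) :: rs
                 | [] => []) := by
  intro vals
  induction vals with
  | nil =>
    intro cur0 l runs
    simp [pvFin, pvRunsOf]
  | cons v vs ih =>
    intro cur0 l runs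
    have hlast : (cur0 ++ [l]).getLast? = some l := by simp
    have hrw : pvRunsOf (l :: v :: vs) =
        (if pvFrame l ≠ pvFrame v - 1 then [l] :: pvRunsOf (v :: vs)
         else match pvRunsOf (v :: vs) with
              | r :: rs => (l :: r) :: rs
              | [] => [[l]]) := rfl
    obtain ⟨r, rs, hr⟩ := pvRunsOf_cons_ne_nil v vs
    by_cases h : pvFrame l ≠ pvFrame v - 1
    · have hstep : pvStep1 (runs, cur0 ++ [l]) v = (runs ++ [cur0 ++ [l]], [v]) := by
        simp [pvStep1, hlast, h]
      calc pvFin ((v :: vs).foldl pvStep1 (runs, cur0 ++ [l]))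
          = pvFin (vs.foldl pvStep1 (runs ++ [cur0 ++ [l]], [] ++ [v])) := by
            simp [List.foldl_cons, hstep]
        _ = runs ++ [cur0 ++ [l]] ++ (match pvRunsOf (v :: vs) with
              | r :: rs => ([] ++ r) :: rs | [] => []) := ih [] v (runs ++ [cur0 ++ [l]])
        _ = runs ++ (match pvRunsOf (l :: v :: vs) with
              | r :: rs => (cur0 ++ r) :: rs | [] => []) := by
            rw [hrw, if_pos h, hr]
            simp
    · have h' : pvFrame l = pvFrame v - 1 := not_not.mp h
      have hstep : pvStep1 (runs, cur0 ++ [l]) v = (runs, (cur0 ++ [l]) ++ [v]) := by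
        simp [pvStep1, hlast, h']
      have hrl : pvRunsOf (l :: v :: vs) = (l :: r) :: rs := by
        rw [hrw, if_neg h, hr]
      calc pvFin ((v :: vs).foldl pvStep1 (runs, cur0 ++ [l]))
          = pvFin (vs.foldl pvStep1 (runs, (cur0 ++ [l]) ++ [v])) := by
            simp [List.foldl_cons, hstep]
        _ = runs ++ (match pvRunsOf (v :: vs) with
              | r :: rs => ((cur0 ++ [l]) ++ r) :: rs | [] => []) := ih (cur0 ++ [l]) v runs
        _ = runs ++ (match pvRunsOf (l :: v :: vs) with
              | r :: rs => (cur0 ++ r) :: rs | [] => []) := by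
            rw [hr, hrl]
            simp

-- L1': from the empty initial state, pass 1 computes exactly the runs
lemma pass1_runs (vals : List (List (String × Int))) :
    pvFin (vals.foldl pvStep1 ([], [])) = pvRunsOf vals := by
  cases vals with
  | nil => rfl
  | cons v vs =>
    have hstep : pvStep1 ([], []) v = ([], [] ++ [v]) := by simp [pvStep1]
    obtain ⟨r, rs, hr⟩ := pvRunsOf_cons_ne_nil v vs
    calc pvFin ((v :: vs).foldl pvStep1 ([], []))
        = pvFin (vs.foldl pvStep1 ([], [] ++ [v])) := by simp [List.foldl_cons, hstep]
      _ = [] ++ (match pvRunsOf (v :: vs) with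
            | r :: rs => ([] ++ r) :: rs | [] => []) := pass1_spec vs [] v []
      _ = pvRunsOf (v :: vs) := by rw [hr]; simp

-- L2: the lookahead loop equals pass 2 folded over the runs (frame_count = buffer length)
lemma loopV_eq_pass2 (W : Int) :
    ∀ (vals : List (List (String × Int))) gd (buf : List (List (String × Int))) (gc : Int),
      pvLoopV W vals (gd, buf, (buf.length : Int), gc) =
        ((pvRunsOf vals).foldl (pvStep2 W) (gd, buf, gc)).1 := by
  intro vals
  induction vals with
  | nil => intro gd buf gc; rfl
  | cons v vs ih =>
    intro gd buf gc
    have hlen : (buf.length : Int) + 1 = ((buf ++ [v]).length : Int) := by simp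
    cases vs with
    | nil =>
      rw [show pvLoopV W [v] (gd, buf, (buf.length : Int), gc)
            = (if W ≤ (buf.length : Int) + 1 then gd.insert (PySem.Int.toStr gc) (buf ++ [v])
               else gd) from rfl]
      rw [show ((pvRunsOf [v]).foldl (pvStep2 W) (gd, buf, gc))
            = (if W ≤ ((buf ++ [v]).length : Int) then
                 (gd.insert (PySem.Int.toStr gc) (buf ++ [v]), ([], gc + 1))
               else (gd, buf ++ [v], gc)) from rfl]
      rw [hlen]
      split_ifs <;> rfl
    | cons w vs' =>
      have hstep3 : pvLoopV W (v :: w :: vs') (gd, buf, (buf.length : Int), gc)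
          = pvLoopV W (w :: vs')
              (if pvFrame v ≠ pvFrame w - 1 then
                 (if W ≤ (buf.length : Int) + 1 then
                    (gd.insert (PySem.Int.toStr gc) (buf ++ [v]), ([], (0:Int), gc + 1))
                  else (gd, buf ++ [v], (buf.length : Int) + 1, gc))
               else (gd, buf ++ [v], (buf.length : Int) + 1, gc)) := rfl
      have hrw : pvRunsOf (v :: w :: vs') =
          (if pvFrame v ≠ pvFrame w - 1 then [v] :: pvRunsOf (w :: vs')
           else match pvRunsOf (w :: vs') with
                | r :: rs => (v :: r) :: rs
                | [] => [[v]]) := rfl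
      have hstep2 : pvStep2 W (gd, buf, gc) [v]
          = (if W ≤ ((buf ++ [v]).length : Int) then
               (gd.insert (PySem.Int.toStr gc) (buf ++ [v]), ([], gc + 1))
             else (gd, buf ++ [v], gc)) := rfl
      rw [hstep3]
      by_cases h : pvFrame v ≠ pvFrame w - 1
      · rw [if_pos h]
        have hruns : pvRunsOf (v :: w :: vs') = [v] :: pvRunsOf (w :: vs') := by
          rw [hrw, if_pos h]
        rw [hruns, List.foldl_cons, hstep2]
        by_cases hW : W ≤ (buf.length : Int) + 1
        · rw [if_pos hW, if_pos (hlen ▸ hW)]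
          have h0 : (0 : Int) = (((([] : List (List (String × Int)))).length : Int)) := rfl
          rw [h0, ih]
        · rw [if_neg hW, if_neg (hlen ▸ hW)]
          rw [hlen, ih]
      · rw [if_neg h]
        obtain ⟨r, rs, hr⟩ := pvRunsOf_cons_ne_nil w vs'
        have hruns : pvRunsOf (v :: w :: vs') = (v :: r) :: rs := by
          rw [hrw, if_neg h, hr]
        rw [hlen, ih, hruns, hr, List.foldl_cons, List.foldl_cons]
        have heq : pvStep2 W (gd, buf, gc) (v :: r) = pvStep2 W (gd, buf ++ [v], gc) r := by
          simp only [pvStep2]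
          rw [List.append_cons]
        rw [heq]

-- ===== VERDICT (by name: the statement is the Claim_ definition above) =====
theorem divide_keypoints_fn_spec : Claim_equal_divide_keypoints_fn := by
  intro kp W _ _
  show divide_keypoints_fn kp W = divide_keypoints_fn_alt kp W
  have key_eq : ∀ (keys : List String),
      (pvLoopA kp W keys keys.length keys 0 (PySem.Dict.empty, [], 0, 1)).1.items
        = ((pvFin ((keys.map (pvVal kp)).foldl pvStep1 ([], []))).foldl (pvStep2 W)
            (PySem.Dict.empty, [], 1)).1.items := by
    intro keys
    rw [pass1_runs]
    congr 1
    rw [loopA_eq_loopV kp W keys keys 0 _ List.drop_zero]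
    have h2 := loopV_eq_pass2 W (keys.map (pvVal kp)) PySem.Dict.empty [] 1
    simpa using h2
  exact key_eq (PySem.List.sorted (PySem.Set.ofList (kp.map Prod.fst)) (fun x => x) false)
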